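-- pv_equiv track=rewrite | github.com/tenstorrent/tt-budabackend | scripts/dram_read_perf_model.py | get_transfer_chunk_size_tiles
-- ===== SOURCE A (Python) =====
-- def is_transfer_chunk_size_within_limits(
--     transfer_chunk_size_tiles: int,
--     tile_size_bytes: int,
--     max_transfer_size_tiles: int,
--     max_transfer_size_bytes: int,
-- ):
--     return (
--         transfer_chunk_size_tiles <= max_transfer_size_tiles
--         and transfer_chunk_size_tiles * tile_size_bytes <= max_transfer_size_bytes
--     )
--
-- def get_transfer_chunk_size_tiles(
--     transfer_chunk_size_tiles: int,
--     min_transfer_chunk_size_tiles: int,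
--     tile_size_bytes: int,
--     max_transfer_size_tiles: int,
--     max_transfer_size_bytes: int,
-- ) -> int:
--     if not is_transfer_chunk_size_within_limits(
--         transfer_chunk_size_tiles, tile_size_bytes, max_transfer_size_tiles, max_transfer_size_bytes
--     ):
--
--         for div in range(2, transfer_chunk_size_tiles + 1):
--             if transfer_chunk_size_tiles % div != 0:
--                 continue
--
--             new_chunk_size = transfer_chunk_size_tiles // div
--             if (
--                 new_chunk_size % min_transfer_chunk_size_tiles == 0
--                 and is_transfer_chunk_size_within_limits(
--                     new_chunk_size,
--                     tile_size_bytes,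
--                     max_transfer_size_tiles,
--                     max_transfer_size_bytes,
--                 )
--             ):
--                 transfer_chunk_size_tiles = new_chunk_size
--                 break
--
--     if not is_transfer_chunk_size_within_limits(
--         transfer_chunk_size_tiles, tile_size_bytes, max_transfer_size_tiles, max_transfer_size_bytes
--     ):
--         transfer_chunk_size_tiles = min_transfer_chunk_size_tiles
--
--     return transfer_chunk_size_tiles
-- ===== SOURCE B (Python) =====
-- def get_transfer_chunk_size_tiles(
--     transfer_chunk_size_tiles: int,
--     min_transfer_chunk_size_tiles: int,
--     tile_size_bytes: int,
--     max_transfer_size_tiles: int,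
--     max_transfer_size_bytes: int,
-- ) -> int:
--     n = transfer_chunk_size_tiles
--
--     def ok(c):
--         return c <= max_transfer_size_tiles and c * tile_size_bytes <= max_transfer_size_bytes
--
--     if ok(n):
--         return n
--     # Scan proper divisors of n in DESCENDING order via the sqrt trick and
--     # return the first (= largest) one that is a multiple of the minimum and
--     # fits the limits.  Large divisors n//d come first (d ascending up to
--     # sqrt(n)), then small divisors d (descending from sqrt(n)).
--     d = 1
--     while d * d <= n:
--         if n % d == 0:
--             m = n // d
--             if m != n and m % min_transfer_chunk_size_tiles == 0 and ok(m):
--                 return m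
--         d += 1
--     d -= 1
--     while d >= 1:
--         if n % d == 0 and d != n and d % min_transfer_chunk_size_tiles == 0 and ok(d):
--             return d
--         d -= 1
--     return min_transfer_chunk_size_tiles
-- ===== Notes on version B (the rewrite author's own statement) =====
-- stated objective: faster
-- what changed: A scans every candidate divisor from 2 up to n; B enumerates the proper divisors of n in descending order via trial division only up to sqrt(n) (large divisors n//d first, then small divisors d), returning the first one that is a multiple of the minimum and within limits.
import Mathlib
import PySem

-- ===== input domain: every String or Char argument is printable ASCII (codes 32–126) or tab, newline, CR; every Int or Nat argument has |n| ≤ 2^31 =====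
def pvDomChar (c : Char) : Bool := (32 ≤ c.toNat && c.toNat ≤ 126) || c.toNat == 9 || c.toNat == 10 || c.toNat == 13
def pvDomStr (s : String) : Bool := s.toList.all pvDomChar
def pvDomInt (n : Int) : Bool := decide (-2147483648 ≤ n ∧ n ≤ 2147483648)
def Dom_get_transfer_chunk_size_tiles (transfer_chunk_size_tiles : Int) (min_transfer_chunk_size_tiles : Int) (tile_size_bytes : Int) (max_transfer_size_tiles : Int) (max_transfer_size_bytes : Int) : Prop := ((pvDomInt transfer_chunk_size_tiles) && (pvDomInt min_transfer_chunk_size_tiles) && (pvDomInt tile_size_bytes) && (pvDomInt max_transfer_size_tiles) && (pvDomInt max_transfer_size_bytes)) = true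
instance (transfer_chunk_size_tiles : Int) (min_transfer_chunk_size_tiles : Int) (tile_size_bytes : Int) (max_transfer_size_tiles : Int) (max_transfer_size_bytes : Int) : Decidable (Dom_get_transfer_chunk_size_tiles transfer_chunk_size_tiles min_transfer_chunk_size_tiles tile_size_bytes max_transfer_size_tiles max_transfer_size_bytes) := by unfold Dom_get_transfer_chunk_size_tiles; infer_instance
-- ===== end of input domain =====

-- B replaces A's linear scan of all candidate divisors 2..n by a sqrt(n) trial-division
-- enumeration of the proper divisors of n in descending order (objective: faster).

-- ===== PORT A =====
def is_transfer_chunk_size_within_limits (transfer_chunk_size_tiles : Int)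
    (tile_size_bytes : Int) (max_transfer_size_tiles : Int) (max_transfer_size_bytes : Int) : Bool :=
  decide (transfer_chunk_size_tiles ≤ max_transfer_size_tiles) &&
  decide (transfer_chunk_size_tiles * tile_size_bytes ≤ max_transfer_size_bytes)

-- the 'for div in range(2, n+1)' loop with its break, as structural recursion over the range list
def pvALoop (n mn tsb mt mb : Int) : List Int → Int
  | [] => n
  | div :: rest =>
    if PySem.Int.mod n div != 0 then pvALoop n mn tsb mt mb rest
    else
      let new_chunk_size := PySem.Int.floordiv n div
      if (PySem.Int.mod new_chunk_size mn == 0) &&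
          is_transfer_chunk_size_within_limits new_chunk_size tsb mt mb then
        new_chunk_size
      else pvALoop n mn tsb mt mb rest

def get_transfer_chunk_size_tiles (transfer_chunk_size_tiles : Int) (min_transfer_chunk_size_tiles : Int) (tile_size_bytes : Int) (max_transfer_size_tiles : Int) (max_transfer_size_bytes : Int) : Int :=
  let t1 :=
    if !(is_transfer_chunk_size_within_limits transfer_chunk_size_tiles tile_size_bytes
          max_transfer_size_tiles max_transfer_size_bytes) then
      pvALoop transfer_chunk_size_tiles min_transfer_chunk_size_tiles tile_size_bytes
        max_transfer_size_tiles max_transfer_size_bytes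
        (PySem.List.pyRange 2 (transfer_chunk_size_tiles + 1))
    else transfer_chunk_size_tiles
  if !(is_transfer_chunk_size_within_limits t1 tile_size_bytes
        max_transfer_size_tiles max_transfer_size_bytes) then
    min_transfer_chunk_size_tiles
  else t1

-- ===== PORT B =====
def pvOkB (c tsb mt mb : Int) : Bool :=
  decide (c ≤ mt) && decide (c * tsb ≤ mb)

-- termination helper for the first while loop: d*d ≤ n forces d ≤ n
theorem pvSqLeImpLe {d n : Int} (h : d * d ≤ n) : d ≤ n := by
  nlinarith [sq_nonneg (2 * d - 1)]

-- second while loop of Source B: d descending from isqrt(n) to 1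
def pvBPhase2 (n mn tsb mt mb d : Int) : Int :=
  if h : 1 ≤ d then
    if (PySem.Int.mod n d == 0) && (d != n) && (PySem.Int.mod d mn == 0) && pvOkB d tsb mt mb then d
    else pvBPhase2 n mn tsb mt mb (d - 1)
  else mn
termination_by d.toNat
decreasing_by omega

-- first while loop of Source B: d ascending while d*d ≤ n, testing m = n // d
def pvBPhase1 (n mn tsb mt mb d : Int) : Int :=
  if h : d * d ≤ n then
    if PySem.Int.mod n d == 0 then
      let m := PySem.Int.floordiv n d
      if (m != n) && (PySem.Int.mod m mn == 0) && pvOkB m tsb mt mb then m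
      else pvBPhase1 n mn tsb mt mb (d + 1)
    else pvBPhase1 n mn tsb mt mb (d + 1)
  else pvBPhase2 n mn tsb mt mb (d - 1)
termination_by (n + 1 - d).toNat
decreasing_by
  · have := pvSqLeImpLe h; omega
  · have := pvSqLeImpLe h; omega

def get_transfer_chunk_size_tiles_alt (transfer_chunk_size_tiles : Int) (min_transfer_chunk_size_tiles : Int) (tile_size_bytes : Int) (max_transfer_size_tiles : Int) (max_transfer_size_bytes : Int) : Int :=
  if pvOkB transfer_chunk_size_tiles tile_size_bytes max_transfer_size_tiles max_transfer_size_bytes then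
    transfer_chunk_size_tiles
  else
    pvBPhase1 transfer_chunk_size_tiles min_transfer_chunk_size_tiles tile_size_bytes
      max_transfer_size_tiles max_transfer_size_bytes 1

-- ===== PRECONDITION & SPEC =====
-- Pre_ excludes exactly the inputs on which Python A raises ZeroDivisionError:
-- min_transfer_chunk_size_tiles = 0 while an out-of-limits chunk of size ≥ 2 makes the
-- divisor loop evaluate 'new_chunk_size % 0' (B raises there as well).
def Pre_get_transfer_chunk_size_tiles (transfer_chunk_size_tiles : Int) (min_transfer_chunk_size_tiles : Int) (tile_size_bytes : Int) (max_transfer_size_tiles : Int) (max_transfer_size_bytes : Int) : Prop :=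
  min_transfer_chunk_size_tiles ≠ 0 ∨ transfer_chunk_size_tiles < 2 ∨
    (transfer_chunk_size_tiles ≤ max_transfer_size_tiles ∧
     transfer_chunk_size_tiles * tile_size_bytes ≤ max_transfer_size_bytes)
instance (transfer_chunk_size_tiles : Int) (min_transfer_chunk_size_tiles : Int) (tile_size_bytes : Int) (max_transfer_size_tiles : Int) (max_transfer_size_bytes : Int) : Decidable (Pre_get_transfer_chunk_size_tiles transfer_chunk_size_tiles min_transfer_chunk_size_tiles tile_size_bytes max_transfer_size_tiles max_transfer_size_bytes) := by unfold Pre_get_transfer_chunk_size_tiles; infer_instance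

def pvWitness_get_transfer_chunk_size_tiles : Int × Int × Int × Int × Int := (8, 1, 1, 4, 100)

def Spec_get_transfer_chunk_size_tiles (transfer_chunk_size_tiles : Int) (min_transfer_chunk_size_tiles : Int) (tile_size_bytes : Int) (max_transfer_size_tiles : Int) (max_transfer_size_bytes : Int) (out : Int) : Prop := out = get_transfer_chunk_size_tiles_alt transfer_chunk_size_tiles min_transfer_chunk_size_tiles tile_size_bytes max_transfer_size_tiles max_transfer_size_bytes
instance (transfer_chunk_size_tiles : Int) (min_transfer_chunk_size_tiles : Int) (tile_size_bytes : Int) (max_transfer_size_tiles : Int) (max_transfer_size_bytes : Int) (out : Int) : Decidable (Spec_get_transfer_chunk_size_tiles transfer_chunk_size_tiles min_transfer_chunk_size_tiles tile_size_bytes max_transfer_size_tiles max_transfer_size_bytes out) := by unfold Spec_get_transfer_chunk_size_tiles; infer_instance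

-- ===== CLAIM (what is proved, stated in full; the proofs are below) =====
def Claim_equal_get_transfer_chunk_size_tiles : Prop := ∀ (transfer_chunk_size_tiles : Int) (min_transfer_chunk_size_tiles : Int) (tile_size_bytes : Int) (max_transfer_size_tiles : Int) (max_transfer_size_bytes : Int), Dom_get_transfer_chunk_size_tiles transfer_chunk_size_tiles min_transfer_chunk_size_tiles tile_size_bytes max_transfer_size_tiles max_transfer_size_bytes → Pre_get_transfer_chunk_size_tiles transfer_chunk_size_tiles min_transfer_chunk_size_tiles tile_size_bytes max_transfer_size_tiles max_transfer_size_bytes → Spec_get_transfer_chunk_size_tiles transfer_chunk_size_tiles min_transfer_chunk_size_tiles tile_size_bytes max_transfer_size_tiles max_transfer_size_bytes (get_transfer_chunk_size_tiles transfer_chunk_size_tiles min_transfer_chunk_size_tiles tile_size_bytes max_transfer_size_tiles max_transfer_size_bytes)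

-- ===== LEMMAS AND PROOFS =====

-- the (shared) property tested of a candidate chunk size m
def pvP (mn tsb mt mb m : Int) : Bool :=
  (PySem.Int.mod m mn == 0) && pvOkB m tsb mt mb

-- m is a proper divisor of n passing the test
def pvGood (n mn tsb mt mb m : Int) : Prop :=
  m ∣ n ∧ 1 ≤ m ∧ m < n ∧ pvP mn tsb mt mb m = true

theorem pvOkB_eq_is (c tsb mt mb : Int) :
    pvOkB c tsb mt mb = is_transfer_chunk_size_within_limits c tsb mt mb := rfl

-- basic divisor arithmetic over Int (ediv), n ≥ 2, divisor d ≥ 1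
theorem pvDivFacts {n d : Int} (hn : 2 ≤ n) (hd : 1 ≤ d) (hdvd : d ∣ n) :
    (n / d) ∣ n ∧ 1 ≤ n / d ∧ n / d * d = n := by
  obtain ⟨k, hk⟩ := hdvd
  have hd0 : d ≠ 0 := by omega
  have hkd : n / d = k := by rw [hk, Int.mul_ediv_cancel_left _ hd0]
  have hk1 : 1 ≤ k := by nlinarith
  have hkdvd : k ∣ n := ⟨d, by rw [hk]; ring⟩
  exact ⟨hkd ▸ hkdvd, by omega, Int.ediv_mul_cancel ⟨k, hk⟩⟩

-- B's phase2 (small divisors, descending): no qualifying divisor ≤ d ⇒ falls through to mn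
theorem pvBPhase2_none (n mn tsb mt mb : Int) (d : Int)
    (hall : ∀ m, 1 ≤ m → m ≤ d → m ∣ n → m ≠ n → pvP mn tsb mt mb m ≠ true) :
    pvBPhase2 n mn tsb mt mb d = mn := by
  by_cases h1 : 1 ≤ d
  · rw [pvBPhase2, dif_pos h1]
    have hcond : ¬ ((PySem.Int.mod n d == 0) && (d != n) && (PySem.Int.mod d mn == 0) && pvOkB d tsb mt mb) = true := by
      intro hc
      simp only [Bool.and_eq_true, beq_iff_eq, bne_iff_ne, ne_eq] at hc
      obtain ⟨⟨⟨hm0, hne⟩, hp1⟩, hp2⟩ := hc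
      have hdvd : d ∣ n := (PySem.Int.mod_eq_zero_iff_dvd n d).mp hm0
      exact hall d h1 le_rfl hdvd hne (by simp [pvP, hp1, hp2])
    rw [if_neg hcond]
    exact pvBPhase2_none n mn tsb mt mb (d - 1) (fun m h1 h2 => hall m h1 (by omega))
  · rw [pvBPhase2, dif_neg h1]
termination_by d.toNat
decreasing_by omega

-- B's phase2 finds M when M ≤ d < n and nothing in (M, n) qualifies
theorem pvBPhase2_found (n mn tsb mt mb M : Int) (d : Int)
    (hM : pvGood n mn tsb mt mb M) (hmax : ∀ m, pvGood n mn tsb mt mb m → m ≤ M)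
    (hMd : M ≤ d) (hdn : d < n) :
    pvBPhase2 n mn tsb mt mb d = M := by
  obtain ⟨hdvd, hM1, hMn, hMp⟩ := hM
  have h1 : 1 ≤ d := by omega
  rw [pvBPhase2, dif_pos h1]
  by_cases hdM : d = M
  · subst hdM
    have : ((PySem.Int.mod n d == 0) && (d != n) && (PySem.Int.mod d mn == 0) && pvOkB d tsb mt mb) = true := by
      have hm0 : PySem.Int.mod n d = 0 := (PySem.Int.mod_eq_zero_iff_dvd n d).mpr hdvd
      simp only [pvP, Bool.and_eq_true, beq_iff_eq, bne_iff_ne, ne_eq] at hMp ⊢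
      exact ⟨⟨⟨hm0, by omega⟩, hMp.1⟩, hMp.2⟩
    rw [if_pos this]
  · have hcond : ¬ ((PySem.Int.mod n d == 0) && (d != n) && (PySem.Int.mod d mn == 0) && pvOkB d tsb mt mb) = true := by
      intro hc
      simp only [Bool.and_eq_true, beq_iff_eq, bne_iff_ne, ne_eq] at hc
      obtain ⟨⟨⟨hm0, hne⟩, hp1⟩, hp2⟩ := hc
      have hgood : pvGood n mn tsb mt mb d :=
        ⟨(PySem.Int.mod_eq_zero_iff_dvd n d).mp hm0, h1, by omega, by simp [pvP, hp1, hp2]⟩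
      exact hdM (le_antisymm (hmax d hgood) (by omega))
    rw [if_neg hcond]
    exact pvBPhase2_found n mn tsb mt mb M (d - 1) ⟨hdvd, hM1, hMn, hMp⟩ hmax (by omega) (by omega)
termination_by (d - M).toNat
decreasing_by omega

-- B's phase1 (large divisors n/d, d ascending): nothing qualifies ⇒ mn
theorem pvBPhase1_none (n mn tsb mt mb : Int) (hn : 2 ≤ n) (d : Int) (hd : 1 ≤ d)
    (hall : ∀ m, ¬ pvGood n mn tsb mt mb m) :
    pvBPhase1 n mn tsb mt mb d = mn := by
  by_cases h : d * d ≤ n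
  · rw [pvBPhase1, dif_pos h]
    have hrec : pvBPhase1 n mn tsb mt mb (d + 1) = mn :=
      pvBPhase1_none n mn tsb mt mb hn (d + 1) (by omega) hall
    by_cases hm0 : PySem.Int.mod n d = 0
    · rw [if_pos (by simpa using hm0)]
      have hdvd : d ∣ n := (PySem.Int.mod_eq_zero_iff_dvd n d).mp hm0
      obtain ⟨hdvd2, hge1, hmul⟩ := pvDivFacts hn hd hdvd
      rw [PySem.Int.floordiv_eq_ediv_of_pos (by omega)]
      have hcond : ¬ ((n / d != n) && (PySem.Int.mod (n / d) mn == 0) && pvOkB (n / d) tsb mt mb) = true := by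
        intro hc
        simp only [Bool.and_eq_true, beq_iff_eq, bne_iff_ne, ne_eq] at hc
        obtain ⟨⟨hne, hp1⟩, hp2⟩ := hc
        have hle : n / d ≤ n := by
          have := Int.le_of_dvd (by omega) hdvd2; omega
        exact hall (n / d) ⟨hdvd2, hge1, by omega, by simp [pvP, hp1, hp2]⟩
      rw [if_neg hcond]; exact hrec
    · rw [if_neg (by simpa using hm0)]; exact hrec
  · rw [pvBPhase1, dif_neg h]
    refine pvBPhase2_none n mn tsb mt mb (d - 1) (fun m h1 h2 hdvd hne hp => ?_)
    have hle : m ≤ n := Int.le_of_dvd (by omega) hdvd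
    exact hall m ⟨hdvd, h1, by omega, hp⟩
termination_by (n + 1 - d).toNat
decreasing_by have := pvSqLeImpLe h; omega

-- B's phase1 finds the greatest qualifying proper divisor M
theorem pvBPhase1_found (n mn tsb mt mb M : Int) (hn : 2 ≤ n)
    (hM : pvGood n mn tsb mt mb M) (hmax : ∀ m, pvGood n mn tsb mt mb m → m ≤ M)
    (d : Int) (hd : 1 ≤ d)
    (hinv : ∀ m, pvGood n mn tsb mt mb m → m * d ≤ n) :
    pvBPhase1 n mn tsb mt mb d = M := by
  obtain ⟨hdvdM, hM1, hMn, hMp⟩ := hM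
  by_cases h : d * d ≤ n
  · rw [pvBPhase1, dif_pos h]
    by_cases hm0 : PySem.Int.mod n d = 0
    · rw [if_pos (by simpa using hm0)]
      have hdvd : d ∣ n := (PySem.Int.mod_eq_zero_iff_dvd n d).mp hm0
      obtain ⟨hdvd2, hge1, hmul⟩ := pvDivFacts hn hd hdvd
      rw [PySem.Int.floordiv_eq_ediv_of_pos (show (0:Int) < d by omega)]
      by_cases hcond : ((n / d != n) && (PySem.Int.mod (n / d) mn == 0) && pvOkB (n / d) tsb mt mb) = true
      · rw [if_pos hcond]
        simp only [Bool.and_eq_true, beq_iff_eq, bne_iff_ne, ne_eq] at hcond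
        obtain ⟨⟨hne, hp1⟩, hp2⟩ := hcond
        have hle : n / d ≤ n := by
          have := Int.le_of_dvd (by omega) hdvd2; omega
        have hgood : pvGood n mn tsb mt mb (n / d) :=
          ⟨hdvd2, hge1, by omega, by simp [pvP, hp1, hp2]⟩
        have h1 : n / d ≤ M := hmax _ hgood
        have h2 : M ≤ n / d := (Int.le_ediv_iff_mul_le (by omega)).mpr
          (hinv M ⟨hdvdM, hM1, hMn, hMp⟩)
        omega
      · rw [if_neg hcond]
        refine pvBPhase1_found n mn tsb mt mb M hn ⟨hdvdM, hM1, hMn, hMp⟩ hmax (d + 1) (by omega)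
          (fun m hg => ?_)
        by_contra hlt
        push_neg at hlt
        obtain ⟨hdvdm, hm1, hmn, hmp⟩ := hg
        have hmd : m * d ≤ n := hinv m ⟨hdvdm, hm1, hmn, hmp⟩
        -- then n / m = d exactly, so n / d = m and the branch condition would have fired
        have hq : n / m = d := by
          have h1 : d ≤ n / m := (Int.le_ediv_iff_mul_le (by omega)).mpr (by nlinarith)
          have h2 : n / m < d + 1 := (Int.ediv_lt_iff_lt_mul (by omega)).mpr (by nlinarith)
          omega
        have hnm : n / m * m = n := Int.ediv_mul_cancel hdvdm
        have hndm : n / d = m := by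
          rw [hq] at hnm
          have : n = d * m := by linarith [hnm]
          rw [this, Int.mul_ediv_cancel_left _ (show d ≠ 0 by omega)]
        apply hcond
        simp only [Bool.and_eq_true, beq_iff_eq, bne_iff_ne, ne_eq, hndm]
        simp only [pvP, Bool.and_eq_true, beq_iff_eq] at hmp
        exact ⟨⟨by omega, hmp.1⟩, hmp.2⟩
    · rw [if_neg (by simpa using hm0)]
      refine pvBPhase1_found n mn tsb mt mb M hn ⟨hdvdM, hM1, hMn, hMp⟩ hmax (d + 1) (by omega)
        (fun m hg => ?_)
      by_contra hlt
      push_neg at hlt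
      obtain ⟨hdvdm, hm1, hmn, hmp⟩ := hg
      have hmd : m * d ≤ n := hinv m ⟨hdvdm, hm1, hmn, hmp⟩
      have hq : n / m = d := by
        have h1 : d ≤ n / m := (Int.le_ediv_iff_mul_le (by omega)).mpr (by nlinarith)
        have h2 : n / m < d + 1 := (Int.ediv_lt_iff_lt_mul (by omega)).mpr (by nlinarith)
        omega
      have hnm : n / m * m = n := Int.ediv_mul_cancel hdvdm
      rw [hq] at hnm
      have : d ∣ n := ⟨m, by linarith⟩
      exact hm0 ((PySem.Int.mod_eq_zero_iff_dvd n d).mpr this)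
  · rw [pvBPhase1, dif_neg h]
    have hMd : M * d ≤ n := hinv M ⟨hdvdM, hM1, hMn, hMp⟩
    have hdn : 1 ≤ d → d ≤ n := fun _ => by nlinarith
    have hMlt : M < d := by nlinarith
    exact pvBPhase2_found n mn tsb mt mb M (d - 1) ⟨hdvdM, hM1, hMn, hMp⟩ hmax (by omega)
      (by have := hdn hd; omega)
termination_by (n + 1 - d).toNat
decreasing_by all_goals (have := pvSqLeImpLe h; omega)

-- A's loop: no divisor e ∈ [d, n] yields a qualifying chunk ⇒ returns n unchanged
theorem pvALoop_none (n mn tsb mt mb : Int) (d : Int) (hd : 2 ≤ d)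
    (hall : ∀ e, d ≤ e → e ≤ n → e ∣ n → pvP mn tsb mt mb (n / e) ≠ true) :
    pvALoop n mn tsb mt mb (PySem.List.pyRange d (n + 1)) = n := by
  by_cases hend : n + 1 ≤ d
  · rw [PySem.List.pyRange_one_eq_nil hend, pvALoop]
  · rw [PySem.List.pyRange_one_cons (by omega), pvALoop]
    have hrec := pvALoop_none n mn tsb mt mb (d + 1) (by omega)
      (fun e h1 h2 => hall e (by omega) h2)
    by_cases hm0 : PySem.Int.mod n d = 0
    · rw [if_neg (by simpa using hm0)]
      simp only
      rw [PySem.Int.floordiv_eq_ediv_of_pos (show (0:Int) < d by omega)]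
      have hdvd : d ∣ n := (PySem.Int.mod_eq_zero_iff_dvd n d).mp hm0
      have hcond : ¬ ((PySem.Int.mod (n / d) mn == 0) &&
          is_transfer_chunk_size_within_limits (n / d) tsb mt mb) = true := by
        intro hc
        exact hall d le_rfl (by omega) hdvd (by simpa [pvP, pvOkB_eq_is] using hc)
      rw [if_neg hcond]
      exact hrec
    · rw [if_pos (by simpa using hm0)]
      exact hrec
termination_by (n + 1 - d).toNat
decreasing_by omega

-- A's loop finds n / D where D = n / M is the smallest qualifying divisor
theorem pvALoop_found (n mn tsb mt mb M : Int) (hn : 2 ≤ n)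
    (hM : pvGood n mn tsb mt mb M) (hmax : ∀ m, pvGood n mn tsb mt mb m → m ≤ M)
    (d : Int) (hd : 2 ≤ d) (hdD : d ≤ n / M) :
    pvALoop n mn tsb mt mb (PySem.List.pyRange d (n + 1)) = M := by
  obtain ⟨hdvdM, hM1, hMn, hMp⟩ := hM
  have hDmul : n / M * M = n := Int.ediv_mul_cancel hdvdM
  have hD1 : 1 ≤ n / M := (Int.le_ediv_iff_mul_le (by omega)).mpr (by omega)
  have hDn : n / M ≤ n := by nlinarith
  have hdn : d ≤ n := le_trans hdD hDn
  rw [PySem.List.pyRange_one_cons (by omega), pvALoop]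
  by_cases hdeq : d = n / M
  · have hnd : n = d * M := by rw [hdeq]; linarith
    have hdvdD : d ∣ n := ⟨M, hnd⟩
    rw [if_neg (by simp [(PySem.Int.mod_eq_zero_iff_dvd n d).mpr hdvdD])]
    simp only
    rw [PySem.Int.floordiv_eq_ediv_of_pos (show (0:Int) < d by omega)]
    have hndM : n / d = M := by
      rw [hnd, Int.mul_ediv_cancel_left _ (show d ≠ 0 by omega)]
    rw [if_pos (by simp only [pvP, pvOkB_eq_is, Bool.and_eq_true] at hMp ⊢; rw [hndM]; exact hMp)]
    exact hndM
  · have hdD' : d < n / M := lt_of_le_of_ne hdD hdeq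
    have hrec := pvALoop_found n mn tsb mt mb M hn ⟨hdvdM, hM1, hMn, hMp⟩ hmax (d + 1)
      (by omega) (by omega)
    by_cases hm0 : PySem.Int.mod n d = 0
    · rw [if_neg (by simpa using hm0)]
      simp only
      rw [PySem.Int.floordiv_eq_ediv_of_pos (show (0:Int) < d by omega)]
      have hdvd : d ∣ n := (PySem.Int.mod_eq_zero_iff_dvd n d).mp hm0
      obtain ⟨hdvd2, hge1, hmul⟩ := pvDivFacts hn (by omega) hdvd
      -- n / d is a proper divisor strictly greater than M, so it cannot qualify
      have hgt : M < n / d := by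
        by_contra hle
        push_neg at hle
        nlinarith
      have hlt : n / d < n := by
        apply (Int.ediv_lt_iff_lt_mul (show (0:Int) < d by omega)).mpr
        nlinarith
      have hcond : ¬ ((PySem.Int.mod (n / d) mn == 0) &&
          is_transfer_chunk_size_within_limits (n / d) tsb mt mb) = true := by
        intro hc
        have hgood : pvGood n mn tsb mt mb (n / d) :=
          ⟨hdvd2, hge1, hlt, by simpa [pvP, pvOkB_eq_is] using hc⟩
        have := hmax _ hgood
        omega
      rw [if_neg hcond]
      exact hrec
    · rw [if_pos (by simpa using hm0)]
      exact hrec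
termination_by (n / M - d).toNat
decreasing_by omega

-- small-n evaluation of B's loops
theorem pvBPhase2_zero (n mn tsb mt mb : Int) : pvBPhase2 n mn tsb mt mb 0 = mn := by
  rw [pvBPhase2]; norm_num

theorem pvB_small (n mn tsb mt mb : Int) (hn : n < 2) :
    pvBPhase1 n mn tsb mt mb 1 = mn := by
  by_cases h1 : n = 1
  · subst h1
    rw [pvBPhase1]
    norm_num [PySem.Int.mod, PySem.Int.floordiv, Int.fmod, Int.fdiv]
    rw [pvBPhase1]
    norm_num
    rw [pvBPhase2]
    norm_num [PySem.Int.mod, Int.fmod]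
    exact pvBPhase2_zero 1 mn tsb mt mb
  · rw [pvBPhase1, dif_neg (by omega)]
    norm_num
    exact pvBPhase2_zero n mn tsb mt mb

-- ===== VERDICT (by name: the statement is the Claim_ definition above) =====
theorem get_transfer_chunk_size_tiles_spec : Claim_equal_get_transfer_chunk_size_tiles := by
  intro n mn tsb mt mb _hDom _hPre
  unfold Spec_get_transfer_chunk_size_tiles
  unfold get_transfer_chunk_size_tiles get_transfer_chunk_size_tiles_alt
  by_cases hok : pvOkB n tsb mt mb = true
  · rw [if_pos hok]
    rw [pvOkB_eq_is] at hok
    simp [hok]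
  · rw [if_neg hok]
    have hok' : is_transfer_chunk_size_within_limits n tsb mt mb = false := by
      rw [← pvOkB_eq_is]; simpa using hok
    simp only [hok', Bool.not_false, if_pos]
    by_cases hn2 : 2 ≤ n
    · by_cases hex : ∃ m, pvGood n mn tsb mt mb m
      · obtain ⟨M, hMgood, hMmax⟩ :=
          Int.exists_greatest_of_bdd
            (P := fun m => pvGood n mn tsb mt mb m)
            ⟨n, fun z hz => le_of_lt hz.2.2.1⟩ hex
        have hA := pvALoop_found n mn tsb mt mb M hn2 hMgood hMmax 2 le_rfl
          (by
            obtain ⟨hdvdM, hM1, hMn, _⟩ := hMgood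
            have hDmul : n / M * M = n := Int.ediv_mul_cancel hdvdM
            have h2M : 2 * M ≤ n := by
              rcases hdvdM with ⟨k, hk⟩
              have hk1 : 2 ≤ k := by nlinarith
              nlinarith
            exact (Int.le_ediv_iff_mul_le (by omega)).mpr h2M)
        have hB := pvBPhase1_found n mn tsb mt mb M hn2 hMgood hMmax 1 le_rfl
          (fun m hg => by have := hg.2.2.1; omega)
        rw [hA, hB]
        have hMok : is_transfer_chunk_size_within_limits M tsb mt mb = true := by
          have := hMgood.2.2.2
          simp only [pvP, pvOkB_eq_is, Bool.and_eq_true] at this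
          exact this.2
        simp [hMok]
      · push_neg at hex
        have hA := pvALoop_none n mn tsb mt mb 2 le_rfl
          (fun e h2e hen hdvd hp => by
            obtain ⟨hdvd2, hge1, hmul⟩ := pvDivFacts hn2 (by omega) hdvd
            have hlt : n / e < n := by
              apply (Int.ediv_lt_iff_lt_mul (show (0:Int) < e by omega)).mpr
              nlinarith
            exact hex (n / e) ⟨hdvd2, hge1, hlt, hp⟩)
        have hB := pvBPhase1_none n mn tsb mt mb hn2 1 le_rfl hex
        rw [hA, hB, hok']
        norm_num
    · rw [PySem.List.pyRange_one_eq_nil (by omega), pvALoop, hok']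
      norm_num
      exact (pvB_small n mn tsb mt mb (by omega)).symm
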